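-- pv_equiv track=rewrite | github.com/OmerCelikel/patika-Projeler | python-temel/main.py | reversedFunc
-- ===== SOURCE A (Python) =====
-- def reversedFunc(myList):
--   reversedList = []
--   #elemanları burada alıyoruz
--   for i in range(len(myList)):
--       #altküme elemanlarını ters çevirmek için
--     newValues = myList[i]
--     valueReversed = newValues[::-1]
--     reversedList.append(valueReversed)
--   #son olarak tüm elemanları ters çevirmek için
--   reversedAll = reversedList[::-1]
--   return reversedAll
-- ===== SOURCE B (Python) =====
-- def _rev(xs):
--     # structural recursion: reverse of (x :: rest) is rev(rest) followed by x
--     if not xs: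
--         return []
--     return _rev(xs[1:]) + [xs[0]]
--
--
-- def reversedFunc(myList):
--     # structural recursion on the outer list: the answer for (h :: t) is the
--     # answer for t followed by the reversal of h
--     if not myList:
--         return []
--     return reversedFunc(myList[1:]) + [_rev(myList[0])]
-- ===== Notes on version B (the rewrite author's own statement) =====
-- stated objective: alternative
-- what changed: B replaces A's index loop with slices plus a trailing slice-reversal by pure structural recursion on the lists: a recursive helper reverses each inner list element by element and the outer recursion emits results back-to-front, with no range(), no slicing and no intermediate forward list.
import Mathlib
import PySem

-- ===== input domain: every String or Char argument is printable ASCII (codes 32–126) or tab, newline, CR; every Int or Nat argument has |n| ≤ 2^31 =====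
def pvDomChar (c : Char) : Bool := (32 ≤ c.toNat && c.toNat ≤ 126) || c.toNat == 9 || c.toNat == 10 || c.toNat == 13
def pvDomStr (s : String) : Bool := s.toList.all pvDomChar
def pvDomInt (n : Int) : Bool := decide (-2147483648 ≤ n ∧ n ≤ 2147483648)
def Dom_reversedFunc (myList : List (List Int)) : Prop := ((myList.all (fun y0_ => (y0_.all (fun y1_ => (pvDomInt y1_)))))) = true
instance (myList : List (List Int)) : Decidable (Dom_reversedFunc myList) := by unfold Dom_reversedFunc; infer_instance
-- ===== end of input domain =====

-- B replaces A's index loop + slice reversals by pure structural recursion on the lists (objective: alternative).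

-- ===== PORT A =====
def reversedFunc (myList : List (List Int)) : List (List Int) :=
  let reversedList := (PySem.List.pyRange 0 (myList.length : Int) 1).foldl
    (fun acc i =>
      let newValues := PySem.List.pyGetD myList i []
      let valueReversed := (PySem.List.slice? newValues none none (-1)).getD []
      acc ++ [valueReversed]) []
  (PySem.List.slice? reversedList none none (-1)).getD []

-- ===== PORT B =====
def revAux : List Int → List Int
  | [] => []
  | x :: xs => revAux xs ++ [x]

def reversedFunc_alt : List (List Int) → List (List Int)
  | [] => []
  | h :: t => reversedFunc_alt t ++ [revAux h]

-- ===== PRECONDITION & SPEC =====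
def Spec_reversedFunc (myList : List (List Int)) (out : List (List Int)) : Prop := out = reversedFunc_alt myList
instance (myList : List (List Int)) (out : List (List Int)) : Decidable (Spec_reversedFunc myList out) := by unfold Spec_reversedFunc; infer_instance

-- ===== CLAIM =====
def Claim_equal_reversedFunc : Prop := ∀ (myList : List (List Int)), Dom_reversedFunc myList → Spec_reversedFunc myList (reversedFunc myList)

-- ===== LEMMAS AND PROOFS =====

-- A's value: forward map, then reverse
theorem reversedFunc_eq (myList : List (List Int)) :
    reversedFunc myList = (myList.map List.reverse).reverse := by
  unfold reversedFunc
  rw [PySem.List.foldl_pyRange_zero_pyGetD' myList []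
      (fun acc v => acc ++ [(PySem.List.slice? v none none (-1)).getD []]) []]
  rw [PySem.List.foldl_append_singleton_eq_map]
  simp [PySem.List.slice?_none_none_neg_one]

theorem revAux_eq (xs : List Int) : revAux xs = xs.reverse := by
  induction xs with
  | nil => rfl
  | cons x xs ih => simp [revAux, ih]

-- B's value: the structural recursion computes the same map-then-reverse
theorem reversedFunc_alt_eq (myList : List (List Int)) :
    reversedFunc_alt myList = (myList.map List.reverse).reverse := by
  induction myList with
  | nil => rfl
  | cons h t ih => simp [reversedFunc_alt, ih, revAux_eq]

-- ===== VERDICT =====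
theorem reversedFunc_spec : Claim_equal_reversedFunc := by
  intro myList _
  unfold Spec_reversedFunc
  rw [reversedFunc_eq, reversedFunc_alt_eq]
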